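-- pv_equiv track=rewrite | github.com/Hu-Ivy/Baishi-Homework | python_test/百钱买鸡.py | baiqianmaiji
-- ===== SOURCE A (Python) =====
-- def baiqianmaiji(money, number):
--     method = []
--     for gongji in range(0, number+1):
--         for muji in range(0, number - gongji+1):
--             xiaoji = 100 - gongji*5 - muji*3
--             if xiaoji>=0:
--                 method.append((gongji, muji, xiaoji))
--     return len(method)
-- ===== SOURCE B (Python) =====
-- def baiqianmaiji(money, number):
--     # Closed-form count per gongji: muji ranges over 0..min(number-gongji, (100-5*gongji)//3)
--     total = 0
--     for gongji in range(0, min(number, 20) + 1):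
--         total += min(number - gongji, (100 - 5 * gongji) // 3) + 1
--     return total
-- ===== Notes on version B (the rewrite author's own statement) =====
-- stated objective: faster
-- what changed: Replaces A's inner loop over muji (and list building plus len) by a closed-form arithmetic range-size min(number-gongji, (100-5*gongji)//3)+1 per gongji, with gongji capped at 20 since no muji qualifies beyond that.
import Mathlib
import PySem

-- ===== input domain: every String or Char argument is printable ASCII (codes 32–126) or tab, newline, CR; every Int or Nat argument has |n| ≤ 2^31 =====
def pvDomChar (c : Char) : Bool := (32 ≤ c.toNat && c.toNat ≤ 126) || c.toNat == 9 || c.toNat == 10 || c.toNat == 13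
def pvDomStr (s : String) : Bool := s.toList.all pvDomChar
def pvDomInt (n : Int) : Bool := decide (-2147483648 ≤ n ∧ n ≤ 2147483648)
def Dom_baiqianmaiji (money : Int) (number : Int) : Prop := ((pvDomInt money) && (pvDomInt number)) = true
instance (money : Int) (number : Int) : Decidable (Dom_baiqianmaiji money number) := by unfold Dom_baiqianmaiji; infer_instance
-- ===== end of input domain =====

-- B replaces A's inner loop over muji by a closed-form range-size count per gongji
-- (and caps gongji at 20, above which no muji qualifies): objective = faster.

-- ===== PORT A =====
def baiqianmaiji (money : Int) (number : Int) : Int :=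
  let method : List (Int × Int × Int) :=
    (PySem.List.pyRange 0 (number + 1) 1).foldl (fun method gongji =>
      (PySem.List.pyRange 0 (number - gongji + 1) 1).foldl (fun method muji =>
        let xiaoji := 100 - gongji * 5 - muji * 3
        if xiaoji ≥ 0 then method ++ [(gongji, muji, xiaoji)] else method) method) []
  (method.length : Int)

-- ===== PORT B =====
def baiqianmaiji_alt (money : Int) (number : Int) : Int :=
  (PySem.List.pyRange 0 (min number 20 + 1) 1).foldl
    (fun total gongji =>
      total + (min (number - gongji) (PySem.Int.floordiv (100 - 5 * gongji) 3) + 1)) 0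

-- ===== PRECONDITION & SPEC =====
def Spec_baiqianmaiji (money : Int) (number : Int) (out : Int) : Prop := out = baiqianmaiji_alt money number
instance (money : Int) (number : Int) (out : Int) : Decidable (Spec_baiqianmaiji money number out) := by unfold Spec_baiqianmaiji; infer_instance

-- ===== CLAIM (what is proved, stated in full; the proofs are below) =====
def Claim_equal_baiqianmaiji : Prop := ∀ (money : Int) (number : Int), Dom_baiqianmaiji money number → Spec_baiqianmaiji money number (baiqianmaiji money number)

-- ===== LEMMAS AND PROOFS =====

-- The closed-form count of m ∈ [a, b) with m ≤ T.
theorem countP_pyRange_le (T : Int) : ∀ (a b : Int),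
    ((PySem.List.pyRange a b 1).countP (fun m => decide (m ≤ T)) : Int)
      = max 0 (min b (T + 1) - a) := by
  intro a b
  by_cases hab : b ≤ a
  · rw [PySem.List.pyRange_one_eq_nil hab]
    simp; omega
  · have h : a < b := by omega
    have : ∀ k : Nat, ∀ a : Int, b - a = k →
        ((PySem.List.pyRange a b 1).countP (fun m => decide (m ≤ T)) : Int)
          = max 0 (min b (T + 1) - a) := by
      intro k
      induction k with
      | zero => intro a ha; rw [PySem.List.pyRange_one_eq_nil (by omega)]; simp; omega
      | succ n ih =>
        intro a ha
        have ih' := ih (a + 1) (by omega)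
        rw [PySem.List.pyRange_one_cons (by omega), List.countP_cons]
        by_cases hT : a ≤ T
        · simp only [hT, decide_true, if_pos]
          push_cast
          omega
        · simp only [hT, decide_false, if_neg, Bool.false_eq_true, not_false_iff]
          push_cast
          omega
    exact this (b - a).toNat a (by omega)

-- The Python condition 3·m ≤ 100 − 5·g reads as m ≤ (100 − 5g) // 3.
theorem cond_iff_le_floordiv (g m : Int) :
    (0 ≤ 100 - g * 5 - m * 3) ↔ m ≤ PySem.Int.floordiv (100 - 5 * g) 3 := by
  have h := (PySem.Int.floordiv_eq_iff_of_pos (a := 100 - 5 * g) (b := 3)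
      (q := PySem.Int.floordiv (100 - 5 * g) 3) (by omega)).mp rfl
  omega

-- A's per-gongji inner-loop contribution, as an Int.
theorem inner_count (number g : Int) :
    (((PySem.List.pyRange 0 (number - g + 1) 1).countP
        (fun m => decide (0 ≤ 100 - g * 5 - m * 3)) : Int))
      = max 0 (min (number - g + 1) (PySem.Int.floordiv (100 - 5 * g) 3 + 1)) := by
  rw [List.countP_congr (q := fun m => decide (m ≤ PySem.Int.floordiv (100 - 5 * g) 3))
      (fun m _ => by simpa using cond_iff_le_floordiv g m)]
  have := countP_pyRange_le (PySem.Int.floordiv (100 - 5 * g) 3) 0 (number - g + 1)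
  omega

-- A computes the sum over gongji of the inner counts.
theorem baiqianmaiji_eq_sum (money number : Int) :
    baiqianmaiji money number
      = ((PySem.List.pyRange 0 (number + 1) 1).map (fun g =>
          (((PySem.List.pyRange 0 (number - g + 1) 1).countP
              (fun m => decide (0 ≤ 100 - g * 5 - m * 3)) : Int)))).sum := by
  unfold baiqianmaiji
  have hinner : ∀ (g : Int) (acc : List (Int × Int × Int)),
      (PySem.List.pyRange 0 (number - g + 1) 1).foldl (fun method muji =>
          let xiaoji := 100 - g * 5 - muji * 3
          if xiaoji ≥ 0 then method ++ [(g, muji, xiaoji)] else method) acc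
        = acc ++ ((PySem.List.pyRange 0 (number - g + 1) 1).filter
            (fun m => decide (0 ≤ 100 - g * 5 - m * 3))).map
            (fun m => (g, m, 100 - g * 5 - m * 3)) := by
    intro g acc
    have := PySem.List.foldl_append_if (fun m => decide (0 ≤ 100 - g * 5 - m * 3))
      (fun m => (g, m, 100 - g * 5 - m * 3)) (PySem.List.pyRange 0 (number - g + 1) 1) acc
    simp only [ge_iff_le, decide_eq_true_eq] at this ⊢
    rw [← this]
  simp only [hinner]
  rw [PySem.List.foldl_append_eq_flatMap
    (fun g => ((PySem.List.pyRange 0 (number - g + 1) 1).filter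
        (fun m => decide (0 ≤ 100 - g * 5 - m * 3))).map
        (fun m => (g, m, 100 - g * 5 - m * 3)))]
  simp [List.length_flatMap, List.countP_eq_length_filter]
  rfl

-- B unfolds to a sum over the capped range.
theorem baiqianmaiji_alt_eq_sum (money number : Int) :
    baiqianmaiji_alt money number
      = ((PySem.List.pyRange 0 (min number 20 + 1) 1).map (fun g =>
          min (number - g) (PySem.Int.floordiv (100 - 5 * g) 3) + 1)).sum := by
  unfold baiqianmaiji_alt
  rw [PySem.List.foldl_add]
  simp

-- ===== VERDICT (by name: the statement is the Claim_ definition above) =====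
theorem baiqianmaiji_spec : Claim_equal_baiqianmaiji := by
  unfold Claim_equal_baiqianmaiji
  intro money number _
  unfold Spec_baiqianmaiji
  rw [baiqianmaiji_eq_sum, baiqianmaiji_alt_eq_sum]
  simp only [inner_count]
  by_cases hneg : number < 0
  · rw [PySem.List.pyRange_one_eq_nil (by omega), PySem.List.pyRange_one_eq_nil (by omega)]
    simp
  · -- split A's range at min number 20 + 1
    rw [PySem.List.pyRange_one_append 0 (min number 20 + 1) (number + 1) (by omega) (by omega)]
    rw [List.map_append, List.sum_append]
    have htail : ((PySem.List.pyRange (min number 20 + 1) (number + 1) 1).map (fun g =>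
        max 0 (min (number - g + 1) (PySem.Int.floordiv (100 - 5 * g) 3 + 1)))).sum = 0 := by
      apply List.sum_eq_zero
      intro x hx
      simp only [List.mem_map] at hx
      obtain ⟨g, hg, rfl⟩ := hx
      rw [PySem.List.mem_pyRange_one] at hg
      have h3 := (PySem.Int.floordiv_eq_iff_of_pos (a := 100 - 5 * g) (b := 3)
          (q := PySem.Int.floordiv (100 - 5 * g) 3) (by omega)).mp rfl
      omega
    rw [htail, add_zero]
    apply congrArg
    apply List.map_congr_left
    intro g hg
    rw [PySem.List.mem_pyRange_one] at hg
    have h3 := (PySem.Int.floordiv_eq_iff_of_pos (a := 100 - 5 * g) (b := 3)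
        (q := PySem.Int.floordiv (100 - 5 * g) 3) (by omega)).mp rfl
    omega
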